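-- pv_equiv track=rewrite | github.com/JFrausto10/CS2302 | Lab2.py | select_bubble
-- ===== SOURCE A (Python) =====
-- def select_bubble(L,k):
--     for position in range(len(L)-1,-1,-1):
--         for i in range(position):
--             if L[i] > L[i+1]:
--                 temp = L[i+1]
--                 L[i+1] = L[i]
--                 L[i] = temp
--                 return L
-- ===== SOURCE B (Python) =====
-- def select_bubble(L, k):
--     i = next((j for j in range(len(L) - 1) if L[j] > L[j + 1]), None)
--     if i is None:
--         return None
--     L[i], L[i + 1] = L[i + 1], L[i]
--     return L
-- ===== Notes on version B (the rewrite author's own statement) =====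
-- stated objective: faster
-- what changed: Replaces A's nested bubble-sort loops (which on a sorted list rescan the whole list for every position before returning None) by a single left-to-right scan that swaps the first adjacent inversion, or returns None if there is none.
import Mathlib
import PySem

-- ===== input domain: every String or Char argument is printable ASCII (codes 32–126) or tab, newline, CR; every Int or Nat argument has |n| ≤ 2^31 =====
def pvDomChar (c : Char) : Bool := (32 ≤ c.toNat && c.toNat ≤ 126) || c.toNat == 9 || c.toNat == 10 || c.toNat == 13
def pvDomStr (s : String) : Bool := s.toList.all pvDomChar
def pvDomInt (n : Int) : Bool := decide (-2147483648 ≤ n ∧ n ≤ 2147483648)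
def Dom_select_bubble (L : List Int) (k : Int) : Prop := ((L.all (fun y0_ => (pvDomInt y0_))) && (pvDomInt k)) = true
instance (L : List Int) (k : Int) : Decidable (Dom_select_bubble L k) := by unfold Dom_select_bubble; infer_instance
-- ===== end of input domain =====

-- B replaces A's nested bubble-sort loops by a single scan for the first adjacent
-- inversion (simpler). Both Pythons mutate L in place identically; the theorems are
-- about the return value.

-- ===== PORT A =====
-- inner loop 'for i in range(position): if L[i] > L[i+1]: swap; return L'
def pvInnerA (L : List Int) (i position : Nat) : Option (List Int) :=
  if _h : i + 1 ≤ position then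
    if L.getD i 0 > L.getD (i + 1) 0 then
      -- temp = L[i+1]; L[i+1] = L[i]; L[i] = temp; return L
      some (((L.set (i + 1) (L.getD i 0))).set i (L.getD (i + 1) 0))
    else pvInnerA L (i + 1) position
  else none
termination_by position - i

-- outer loop 'for position in range(len(L)-1, -1, -1): …'; falls off the end → None
def pvOuterA (L : List Int) (positions : List Int) : Option (List Int) :=
  match positions with
  | [] => none
  | p :: rest =>
    match pvInnerA L 0 p.toNat with
    | some r => some r
    | none => pvOuterA L rest

def select_bubble (L : List Int) (k : Int) : Option (List Int) :=
  pvOuterA L (PySem.List.pyRange ((L.length : Int) - 1) (-1) (-1))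

-- ===== PORT B =====
-- next((j for j in range(len(L)-1) if L[j] > L[j+1]), None)
def pvFindInv (L : List Int) (i : Nat) : Option Nat :=
  if _h : i + 1 < L.length then
    if L.getD i 0 > L.getD (i + 1) 0 then some i else pvFindInv L (i + 1)
  else none
termination_by L.length - i

def select_bubble_alt (L : List Int) (k : Int) : Option (List Int) :=
  match pvFindInv L 0 with
  | none => none
  | some i => some ((L.set i (L.getD (i + 1) 0)).set (i + 1) (L.getD i 0))

-- ===== PRECONDITION & SPEC =====
def Spec_select_bubble (L : List Int) (k : Int) (out : Option (List Int)) : Prop := out = select_bubble_alt L k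
instance (L : List Int) (k : Int) (out : Option (List Int)) : Decidable (Spec_select_bubble L k out) := by unfold Spec_select_bubble; infer_instance

-- ===== CLAIM (what is proved, stated in full; the proofs are below) =====
def Claim_equal_select_bubble : Prop := ∀ (L : List Int) (k : Int), Dom_select_bubble L k → Spec_select_bubble L k (select_bubble L k)

-- ===== LEMMAS AND PROOFS =====

-- the first inner pass (position = len-1) computes exactly B's first-inversion swap
theorem pvInnerA_eq_findInv (L : List Int) (i : Nat) :
    pvInnerA L i (L.length - 1) =
      (pvFindInv L i).map (fun j => (L.set (j + 1) (L.getD j 0)).set j (L.getD (j + 1) 0)) := by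
  unfold pvInnerA pvFindInv
  have hcond : (i + 1 ≤ L.length - 1) ↔ (i + 1 < L.length) := by omega
  by_cases h : i + 1 < L.length
  · rw [dif_pos (hcond.mpr h), dif_pos h]
    by_cases hgt : L.getD i 0 > L.getD (i + 1) 0
    · rw [if_pos hgt, if_pos hgt, Option.map_some]
    · rw [if_neg hgt, if_neg hgt]
      exact pvInnerA_eq_findInv L (i + 1)
  · rw [dif_neg (hcond.not.mpr h), dif_neg h, Option.map_none]
termination_by L.length - i

-- when B finds no inversion from i on, A's inner pass finds none for any position ≤ len-1
theorem pvInnerA_none (L : List Int) (i p : Nat) (hp : p ≤ L.length - 1)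
    (h : pvFindInv L i = none) : pvInnerA L i p = none := by
  unfold pvInnerA
  by_cases hi : i + 1 ≤ p
  · have hlt : i + 1 < L.length := by omega
    unfold pvFindInv at h
    rw [dif_pos hlt] at h
    by_cases hgt : L.getD i 0 > L.getD (i + 1) 0
    · rw [if_pos hgt] at h; exact absurd h (by simp)
    · rw [if_neg hgt] at h
      rw [dif_pos hi, if_neg hgt]
      exact pvInnerA_none L (i + 1) p hp h
  · rw [dif_neg hi]
termination_by p - i

theorem pvOuterA_none (L : List Int) (positions : List Int)
    (hb : ∀ p ∈ positions, p.toNat ≤ L.length - 1)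
    (h : pvFindInv L 0 = none) : pvOuterA L positions = none := by
  induction positions with
  | nil => rfl
  | cons p rest ih =>
    unfold pvOuterA
    rw [pvInnerA_none L 0 p.toNat (hb p List.mem_cons_self) h]
    exact ih (fun q hq => hb q (List.mem_cons_of_mem _ hq))

-- ===== VERDICT (by name: the statement is the Claim_ definition above) =====
theorem select_bubble_spec : Claim_equal_select_bubble := by
  intro L k _
  show select_bubble L k = select_bubble_alt L k
  unfold select_bubble select_bubble_alt
  by_cases hL : L.length = 0
  · -- empty list: range is empty, findInv is none
    rw [PySem.List.pyRange_neg_one_eq_nil (by omega)]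
    unfold pvFindInv
    rw [dif_neg (by omega)]
    rfl
  · have hcons : PySem.List.pyRange ((L.length : Int) - 1) (-1) (-1) =
        ((L.length : Int) - 1) :: PySem.List.pyRange ((L.length : Int) - 1 - 1) (-1) (-1) :=
      PySem.List.pyRange_neg_one_cons (by omega)
    rw [hcons]
    unfold pvOuterA
    have htoNat : ((L.length : Int) - 1).toNat = L.length - 1 := by omega
    rw [htoNat, pvInnerA_eq_findInv]
    cases hf : pvFindInv L 0 with
    | some j =>
      -- the two swap expressions write different indices, so the sets commute
      simp only [Option.map_some]
      exact congrArg some (List.set_comm _ _ (by omega))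
    | none =>
      simp only [Option.map_none]
      rw [pvOuterA_none L _ ?_ hf]
      intro p hp
      rw [PySem.List.mem_pyRange_neg_one] at hp
      omega
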